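-- pv_equiv track=rewrite | github.com/HappynessI/verl-for-AgentGym | data/textcraft/entropy_based_prefix/scripts/10_audit_entropy_release.py | contiguous_blocks
-- ===== SOURCE A (Python) =====
-- from typing import Any, Dict, Iterable, List, Optional, Tuple
--
-- def contiguous_blocks(mask: Iterable[Any]) -> List[Tuple[int, int]]:
--     mask_values = [int(value) for value in mask]
--     blocks: List[Tuple[int, int]] = []
--     start = None
--     for idx, value in enumerate(mask_values):
--         is_active = value > 0
--         if is_active and start is None:
--             start = idx
--         elif not is_active and start is not None:
--             blocks.append((start, idx))
--             start = None
--     if start is not None: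
--         blocks.append((start, len(mask_values)))
--     return blocks
-- ===== SOURCE B (Python) =====
-- from typing import Any, Iterable, List, Tuple
--
-- def contiguous_blocks(mask: Iterable[Any]) -> List[Tuple[int, int]]:
--     active = [int(value) > 0 for value in mask]
--     padded = [False] + active + [False]
--     pairs = list(zip(padded, padded[1:]))
--     starts = [i for i, (prev, cur) in enumerate(pairs) if cur and not prev]
--     ends = [i for i, (prev, cur) in enumerate(pairs) if prev and not cur]
--     return list(zip(starts, ends))
-- ===== Notes on version B (the rewrite author's own statement) =====
-- stated objective: alternative
-- what changed: Replaced A's single stateful scan carrying a mutable start/None sentinel with an edge-detection decomposition: pad the activity list with False on both ends, collect rising-edge indices (starts) and falling-edge indices (ends) as two separate lists, and zip them into blocks.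
import Mathlib
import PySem

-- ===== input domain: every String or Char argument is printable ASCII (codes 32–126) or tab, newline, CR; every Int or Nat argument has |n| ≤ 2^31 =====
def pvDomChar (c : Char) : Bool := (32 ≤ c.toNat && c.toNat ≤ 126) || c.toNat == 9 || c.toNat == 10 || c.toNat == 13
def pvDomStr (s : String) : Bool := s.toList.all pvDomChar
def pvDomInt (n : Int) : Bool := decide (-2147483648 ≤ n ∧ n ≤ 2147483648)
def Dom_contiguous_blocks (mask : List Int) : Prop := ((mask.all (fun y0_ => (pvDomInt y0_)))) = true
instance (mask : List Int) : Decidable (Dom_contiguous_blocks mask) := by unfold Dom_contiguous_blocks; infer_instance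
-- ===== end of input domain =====

-- B replaces A's mutable start/None sentinel scan with padded edge lists zipped into blocks (alternative decomposition, same cost).

-- ===== PORT A =====
-- the for loop over enumerate(mask_values), state = (blocks, start), idx the running index
def contiguousLoopA (blocks : List (Int × Int)) (start : Option Int) (idx : Int) :
    List Int → List (Int × Int) × Option Int
  | [] => (blocks, start)
  | v :: rest =>
    let isActive := decide (v > 0)
    if isActive && start.isNone then
      contiguousLoopA blocks (some idx) (idx + 1) rest
    else if !isActive && start.isSome then
      contiguousLoopA (blocks ++ [(start.getD 0, idx)]) none (idx + 1) rest
    else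
      contiguousLoopA blocks start (idx + 1) rest

def contiguous_blocks (mask : List Int) : List (Int × Int) :=
  let mask_values := mask   -- [int(value) for value in mask]: values are already ints
  let r := contiguousLoopA [] none 0 mask_values
  match r.2 with
  | some s => r.1 ++ [(s, (mask_values.length : Int))]
  | none => r.1

-- ===== PORT B =====
-- the two index comprehensions over enumerate(pairs), index counter i
def edgeStarts (i : Int) : List (Bool × Bool) → List Int
  | [] => []
  | (prev, cur) :: t => (if cur && !prev then [i] else []) ++ edgeStarts (i + 1) t

def edgeEnds (i : Int) : List (Bool × Bool) → List Int
  | [] => []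
  | (prev, cur) :: t => (if prev && !cur then [i] else []) ++ edgeEnds (i + 1) t

def contiguous_blocks_alt (mask : List Int) : List (Int × Int) :=
  let active := mask.map (fun v => decide (v > 0))
  let padded := [false] ++ active ++ [false]
  let pairs := List.zip padded (padded.drop 1)   -- padded[1:] : nonnegative slice, drop 1 is exact
  let starts := edgeStarts 0 pairs
  let ends := edgeEnds 0 pairs
  List.zip starts ends

-- ===== PRECONDITION & SPEC =====
def Spec_contiguous_blocks (mask : List Int) (out : List (Int × Int)) : Prop := out = contiguous_blocks_alt mask
instance (mask : List Int) (out : List (Int × Int)) : Decidable (Spec_contiguous_blocks mask out) := by unfold Spec_contiguous_blocks; infer_instance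

-- ===== CLAIM (what is proved, stated in full; the proofs are below) =====
def Claim_equal_contiguous_blocks : Prop := ∀ (mask : List Int), Dom_contiguous_blocks mask → Spec_contiguous_blocks mask (contiguous_blocks mask)

-- ===== LEMMAS AND PROOFS =====

-- canonical description of the blocks of a boolean activity list
mutual
def runsN (i : Int) : List Bool → List (Int × Int)
  | [] => []
  | b :: t => if b then runsS i (i + 1) t else runsN (i + 1) t
def runsS (s i : Int) : List Bool → List (Int × Int)
  | [] => [(s, i)]
  | b :: t => if b then runsS s (i + 1) t else (s, i) :: runsN (i + 1) t
end

-- adjacent pairs of a list, seeded with a previous element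
def pairsAux (p : Bool) : List Bool → List (Bool × Bool)
  | [] => []
  | c :: t => (p, c) :: pairsAux c t

theorem zip_cons_self (p : Bool) (L : List Bool) : List.zip (p :: L) L = pairsAux p L := by
  induction L generalizing p with
  | nil => rfl
  | cons c t ih => rw [pairsAux, List.zip_cons_cons, ih c]

def finishA (r : List (Int × Int) × Option Int) (n : Int) : List (Int × Int) :=
  match r.2 with
  | some s => r.1 ++ [(s, n)]
  | none => r.1

theorem loopA_eq_runs (l : List Int) (blocks : List (Int × Int)) (idx : Int) (start : Option Int) :
    finishA (contiguousLoopA blocks start idx l) (idx + l.length) =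
      blocks ++ (match start with
        | none => runsN idx (l.map (fun v => decide (v > 0)))
        | some s => runsS s idx (l.map (fun v => decide (v > 0)))) := by
  induction l generalizing blocks idx start with
  | nil => cases start <;> simp [contiguousLoopA, finishA, runsN, runsS]
  | cons v t ih =>
    have hlen : ∀ j : Int, j + ((t.length : Int) + 1) = (j + 1) + (t.length : Int) := by
      intro j; ring
    by_cases hv : v > 0 <;> cases start <;>
        simp [contiguousLoopA, hv, runsN, runsS] <;>
      rw [hlen, ih] <;> simp

theorem edges_zip_eq_runs (l : List Bool) :
    (∀ i : Int, List.zip (edgeStarts i (pairsAux false (l ++ [false])))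
        (edgeEnds i (pairsAux false (l ++ [false]))) = runsN i l) ∧
    (∀ i s : Int, List.zip (s :: edgeStarts i (pairsAux true (l ++ [false])))
        (edgeEnds i (pairsAux true (l ++ [false]))) = runsS s i l) := by
  induction l with
  | nil =>
    constructor <;> intros <;>
      simp [pairsAux, edgeStarts, edgeEnds, runsN, runsS, List.zip_cons_cons]
  | cons c t ih =>
    obtain ⟨ihN, ihS⟩ := ih
    constructor
    · intro i
      cases c
      · simpa [pairsAux, edgeStarts, edgeEnds, runsN] using ihN (i + 1)
      · simpa [pairsAux, edgeStarts, edgeEnds, runsN] using ihS (i + 1) i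
    · intro i s
      cases c
      · simpa [pairsAux, edgeStarts, edgeEnds, runsS, List.zip_cons_cons] using ihN (i + 1)
      · simpa [pairsAux, edgeStarts, edgeEnds, runsS] using ihS (i + 1) s

-- ===== VERDICT (by name: the statement is the Claim_ definition above) =====
theorem contiguous_blocks_spec : Claim_equal_contiguous_blocks := by
  intro mask _
  show contiguous_blocks mask = contiguous_blocks_alt mask
  have hA := loopA_eq_runs mask [] 0 none
  have hB := (edges_zip_eq_runs (mask.map (fun v => decide (v > 0)))).1 0
  have halt : contiguous_blocks_alt mask =
      List.zip
        (edgeStarts 0 (List.zip (false :: (mask.map (fun v => decide (v > 0)) ++ [false]))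
          (mask.map (fun v => decide (v > 0)) ++ [false])))
        (edgeEnds 0 (List.zip (false :: (mask.map (fun v => decide (v > 0)) ++ [false]))
          (mask.map (fun v => decide (v > 0)) ++ [false]))) := rfl
  rw [zip_cons_self] at halt
  calc contiguous_blocks mask
      = finishA (contiguousLoopA [] none 0 mask) (0 + (mask.length : Int)) := by
        simp [contiguous_blocks, finishA]
    _ = runsN 0 (mask.map (fun v => decide (v > 0))) := by simpa using hA
    _ = contiguous_blocks_alt mask := by rw [halt, hB]
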